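-- pv_equiv track=rewrite | github.com/Nghia03092004/nghia03092004.github.io | project_euler/problem_509/solution.py | compute_grundy
-- ===== SOURCE A (Python) =====
-- def compute_grundy(N: int) -> list:
--     """
--     Compute Grundy values for Divisor Nim for positions 0..N.
--     g(n) = mex{g(n-d) : d | n, 1 <= d < n}
--     """
--     g = [0] * (N + 1)
--
--     # Precompute proper divisors for each n using sieve
--     # proper_divs[n] = {d : d | n, 1 <= d < n}
--     proper_divs = [[] for _ in range(N + 1)]
--     for d in range(1, N + 1):
--         for multiple in range(2 * d, N + 1, d):
--             proper_divs[multiple].append(d)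
--
--     for n in range(2, N + 1):
--         reachable = set()
--         for d in proper_divs[n]:
--             reachable.add(g[n - d])
--         # mex
--         mex = 0
--         while mex in reachable:
--             mex += 1
--         g[n] = mex
--
--     return g
-- ===== SOURCE B (Python) =====
-- def compute_grundy(N: int) -> list:
--     """
--     Compute Grundy values for Divisor Nim for positions 0..N.
--     Uses the closed form g(n) = v2(n), the 2-adic valuation of n
--     (number of trailing zero bits), with g(0) = g(1) = 0.
--     """
--     def v2(m):
--         if m > 1 and m % 2 == 0:
--             return v2(m // 2) + 1
--         return 0
--
--     return [v2(n) for n in range(N + 1)]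
-- ===== Notes on version B (the rewrite author's own statement) =====
-- stated objective: faster
-- what changed: Replaced the divisor sieve plus per-position mex computation by the closed form g(n) = 2-adic valuation of n (trailing-zero count), computed independently for each n.
import Mathlib
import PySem

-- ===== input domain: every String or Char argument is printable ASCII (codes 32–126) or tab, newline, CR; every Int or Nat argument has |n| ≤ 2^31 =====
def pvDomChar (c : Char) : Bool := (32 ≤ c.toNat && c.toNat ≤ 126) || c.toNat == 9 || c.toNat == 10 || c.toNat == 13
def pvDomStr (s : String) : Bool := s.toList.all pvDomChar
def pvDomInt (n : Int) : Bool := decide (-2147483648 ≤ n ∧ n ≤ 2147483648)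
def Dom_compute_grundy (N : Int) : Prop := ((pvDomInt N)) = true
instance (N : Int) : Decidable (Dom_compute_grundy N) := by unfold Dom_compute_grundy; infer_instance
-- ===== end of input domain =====

-- B replaces A's proper-divisor sieve + per-position mex loop by the closed form
-- g(n) = 2-adic valuation of n (count of trailing zero bits); the proof below shows they agree.

-- ===== PORT A =====

-- the 'while mex in reachable: mex += 1' loop of A; the fuel |reachable|+1 passed at the
-- call site is a totality guard only (the mex of a finite set s is at most |s|, proved below)
def pvMexLoop (s : List Int) : Nat → Int → Int
  | 0, mex => mex
  | fuel + 1, mex => if mex ∈ s then pvMexLoop s fuel (mex + 1) else mex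

def compute_grundy (N : Int) : List Int :=
  -- g = [0] * (N + 1)
  let g : List Int := List.replicate (N + 1).toNat 0
  -- proper_divs = [[] for _ in range(N + 1)]
  let pd0 : List (List Int) := (PySem.List.pyRange 0 (N + 1) 1).map (fun _ => ([] : List Int))
  -- sieve: for d in range(1, N+1): for multiple in range(2*d, N+1, d): proper_divs[multiple].append(d)
  let pd : List (List Int) :=
    (PySem.List.pyRange 1 (N + 1) 1).foldl (fun pd d =>
      (PySem.List.pyRange (2 * d) (N + 1) d).foldl (fun pd m =>
        PySem.List.pySetD pd m (PySem.List.pyGetD pd m [] ++ [d])) pd) pd0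
  -- for n in range(2, N+1): reachable = {g[n-d] : d in proper_divs[n]}; g[n] = mex(reachable)
  (PySem.List.pyRange 2 (N + 1) 1).foldl (fun g n =>
    let reachable : PySem.Set Int :=
      (PySem.List.pyGetD pd n []).foldl (fun s d => PySem.Set.add s (PySem.List.pyGetD g (n - d) 0))
        PySem.Set.empty
    PySem.List.pySetD g n (pvMexLoop reachable (reachable.length + 1) 0)) g

-- ===== PORT B =====

-- def v2(m): return v2(m // 2) + 1 if m > 1 and m % 2 == 0 else 0
def pvV2 (m : Int) : Int :=
  if h : 1 < m ∧ PySem.Int.mod m 2 = 0 then pvV2 (PySem.Int.floordiv m 2) + 1 else 0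
  termination_by m.toNat
  decreasing_by
    rw [PySem.Int.floordiv_eq_ediv_of_pos (by omega)]
    omega

def compute_grundy_alt (N : Int) : List Int :=
  (PySem.List.pyRange 0 (N + 1) 1).map pvV2

-- ===== PRECONDITION & SPEC =====
def Spec_compute_grundy (N : Int) (out : List Int) : Prop := out = compute_grundy_alt N
instance (N : Int) (out : List Int) : Decidable (Spec_compute_grundy N out) := by unfold Spec_compute_grundy; infer_instance

-- ===== CLAIM (what is proved, stated in full; the proofs are below) =====
def Claim_equal_compute_grundy : Prop := ∀ (N : Int), Dom_compute_grundy N → Spec_compute_grundy N (compute_grundy N)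

-- ===== LEMMAS AND PROOFS =====

-- a Nat mirror of pvV2, used as the mathematical specification
def pvV2n : Nat → Nat
  | 0 => 0
  | 1 => 0
  | n + 2 => if (n + 2) % 2 = 0 then pvV2n ((n + 2) / 2) + 1 else 0

theorem pvV2n_eq (n : Nat) : pvV2n n = if 1 < n ∧ n % 2 = 0 then pvV2n (n / 2) + 1 else 0 := by
  match n with
  | 0 => simp [pvV2n]
  | 1 => simp [pvV2n]
  | n + 2 =>
    rw [pvV2n]
    have h : 1 < n + 2 := by omega
    simp [h]

theorem pvV2_cast (n : Nat) : pvV2 (n : Int) = (pvV2n n : Int) := by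
  induction n using Nat.strong_induction_on with
  | _ n ih =>
    rw [pvV2, pvV2n_eq]
    have hm : PySem.Int.mod (n : Int) 2 = ((n % 2 : Nat) : Int) := by
      exact_mod_cast PySem.Int.mod_natCast n 2
    have hf : PySem.Int.floordiv (n : Int) 2 = ((n / 2 : Nat) : Int) := by
      exact_mod_cast PySem.Int.floordiv_natCast n 2
    by_cases h : 1 < n ∧ n % 2 = 0
    · have h' : 1 < (n : Int) ∧ PySem.Int.mod (n : Int) 2 = 0 := by
        constructor
        · exact_mod_cast h.1
        · rw [hm, h.2]; rfl
      rw [dif_pos h', if_pos h, hf, ih (n / 2) (by omega)]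
      push_cast
      ring
    · have h' : ¬ (1 < (n : Int) ∧ PySem.Int.mod (n : Int) 2 = 0) := by
        intro hc
        apply h
        constructor
        · exact_mod_cast hc.1
        · have := hc.2
          rw [hm] at this
          exact_mod_cast this
      rw [dif_neg h', if_neg h]
      rfl

theorem pvV2n_pow_mul (k m : Nat) (hm : m % 2 = 1) : pvV2n (2 ^ k * m) = k := by
  induction k with
  | zero => rw [pow_zero, one_mul, pvV2n_eq]; simp [hm]
  | succ k ih =>
    have he : 2 ^ (k + 1) * m = 2 * (2 ^ k * m) := by ring
    have h1 : 1 < 2 ^ (k + 1) * m := by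
      have : 0 < 2 ^ k * m := Nat.mul_pos (Nat.two_pow_pos k) (by omega)
      omega
    rw [pvV2n_eq]
    have h2 : (2 ^ (k + 1) * m) % 2 = 0 := by omega
    have h3 : (2 ^ (k + 1) * m) / 2 = 2 ^ k * m := by omega
    simp [h1, h2, h3, ih]

theorem pvV2n_decomp (n : Nat) (hn : 1 ≤ n) : ∃ k m, m % 2 = 1 ∧ n = 2 ^ k * m := by
  induction n using Nat.strong_induction_on with
  | _ n ih =>
    by_cases h : n % 2 = 1
    · exact ⟨0, n, h, by ring⟩
    · have h2 : n % 2 = 0 := by omega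
      have hlt : n / 2 < n := by omega
      have hge : 1 ≤ n / 2 := by omega
      obtain ⟨k, m, hm, he⟩ := ih (n / 2) hlt hge
      refine ⟨k + 1, m, hm, ?_⟩
      have h3 : n = 2 * (n / 2) := by omega
      rw [h3, he, pow_succ]; ring

-- (i) every value below v2(n) is reached by subtracting some proper divisor
theorem pv_reach (n : Nat) (hn : 2 ≤ n) (j : Nat) (hj : j < pvV2n n) :
    ∃ d, 1 ≤ d ∧ d ∣ n ∧ 2 * d ≤ n ∧ pvV2n (n - d) = j := by
  obtain ⟨k, m, hm, he⟩ := pvV2n_decomp n (by omega)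
  have hv : pvV2n n = k := by rw [he]; exact pvV2n_pow_mul k m hm
  rw [hv] at hj
  refine ⟨2 ^ j, Nat.one_le_two_pow, ?_, ?_, ?_⟩
  · rw [he]; exact Dvd.dvd.mul_right (pow_dvd_pow 2 (by omega)) m
  · calc 2 * 2 ^ j = 2 ^ (j + 1) := by ring
      _ ≤ 2 ^ k := Nat.pow_le_pow_right (by omega) (by omega)
      _ ≤ 2 ^ k * m := Nat.le_mul_of_pos_right _ (by omega)
      _ = n := he.symm
  · have hsplit : 2 ^ k = 2 ^ j * 2 ^ (k - j) := by
      rw [← pow_add]; congr 1; omega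
    have hin : 1 ≤ 2 ^ (k - j) * m := Nat.mul_pos (Nat.two_pow_pos _) (by omega)
    have hev : (2 ^ (k - j) * m) % 2 = 0 := by
      have : 2 ∣ 2 ^ (k - j) := dvd_pow_self 2 (by omega)
      have : 2 ∣ 2 ^ (k - j) * m := this.mul_right m
      omega
    have hnd : n - 2 ^ j = 2 ^ j * (2 ^ (k - j) * m - 1) := by
      have : 2 ^ j * (2 ^ (k - j) * m - 1) + 2 ^ j = n := by
        rw [he, hsplit]
        calc 2 ^ j * (2 ^ (k - j) * m - 1) + 2 ^ j
            = 2 ^ j * ((2 ^ (k - j) * m - 1) + 1) := by ring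
          _ = 2 ^ j * (2 ^ (k - j) * m) := by rw [Nat.sub_add_cancel hin]
          _ = 2 ^ j * 2 ^ (k - j) * m := by ring
      omega
    rw [hnd]
    exact pvV2n_pow_mul j _ (by omega)

theorem pv_mul_sub (a b c : Nat) (h : c ≤ b) : a * b - a * c = a * (b - c) := by
  calc a * b - a * c = a * ((b - c) + c) - a * c := by rw [Nat.sub_add_cancel h]
    _ = (a * (b - c) + a * c) - a * c := by ring_nf
    _ = a * (b - c) := by omega

-- (ii) v2(n) itself is never reached by subtracting a proper divisor
theorem pv_not_reach (n : Nat) (hn : 2 ≤ n) (d : Nat) (hd1 : 1 ≤ d) (hdvd : d ∣ n)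
    (hd2 : 2 * d ≤ n) : pvV2n (n - d) ≠ pvV2n n := by
  obtain ⟨k, m, hm, he⟩ := pvV2n_decomp n (by omega)
  obtain ⟨j, e, hem, hed⟩ := pvV2n_decomp d hd1
  have hv : pvV2n n = k := by rw [he]; exact pvV2n_pow_mul k m hm
  have hcop2m : Nat.Coprime 2 m := (Nat.prime_two.coprime_iff_not_dvd).mpr (by omega)
  have hcop2e : Nat.Coprime 2 e := (Nat.prime_two.coprime_iff_not_dvd).mpr (by omega)
  have hdvd' : 2 ^ j * e ∣ 2 ^ k * m := by rw [← hed, ← he]; exact hdvd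
  have hjk : j ≤ k := by
    have h1 : 2 ^ j ∣ 2 ^ k * m := dvd_trans (Dvd.dvd.mul_right (dvd_refl _) e) hdvd'
    have h2 : 2 ^ j ∣ 2 ^ k := (Nat.Coprime.pow_left j hcop2m).dvd_of_dvd_mul_right h1
    exact (Nat.pow_dvd_pow_iff_le_right (by omega)).mp h2
  have hedm : e ∣ m := by
    have h1 : e ∣ 2 ^ k * m := dvd_trans (Dvd.dvd.mul_left (dvd_refl _) _) hdvd'
    exact ((hcop2e.symm).pow_right k).dvd_of_dvd_mul_left h1
  have hme : e ≤ m := Nat.le_of_dvd (by omega) hedm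
  rw [hv]
  rcases Nat.lt_or_ge j k with hjlt | hjge
  · -- j < k : v2(n - d) = j < k
    have hsplit : 2 ^ k = 2 ^ j * 2 ^ (k - j) := by rw [← pow_add]; congr 1; omega
    have hue : e ≤ 2 ^ (k - j) * m :=
      le_trans hme (Nat.le_mul_of_pos_left m (by positivity))
    have hev : (2 ^ (k - j) * m) % 2 = 0 := by
      have h1 : 2 ∣ 2 ^ (k - j) := dvd_pow_self 2 (by omega)
      have := h1.mul_right m
      omega
    have hnd : n - d = 2 ^ j * (2 ^ (k - j) * m - e) := by
      rw [he, hed, hsplit]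
      calc 2 ^ j * 2 ^ (k - j) * m - 2 ^ j * e
          = 2 ^ j * (2 ^ (k - j) * m) - 2 ^ j * e := by ring_nf
        _ = 2 ^ j * (2 ^ (k - j) * m - e) := pv_mul_sub _ _ _ hue
    rw [hnd, pvV2n_pow_mul j _ (by omega)]
    omega
  · -- j = k : d = 2^k e, n - d = 2^k (m - e), m - e even and positive
    have hjk' : j = k := by omega
    subst hjk'
    have h2e : 2 * e ≤ m := by
      have h1 : 2 * (2 ^ j * e) ≤ 2 ^ j * m := by rw [← he, ← hed]; exact hd2
      have h' : 2 ^ j * (2 * e) ≤ 2 ^ j * m := by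
        have h2 : 2 ^ j * (2 * e) = 2 * (2 ^ j * e) := by ring
        omega
      exact Nat.le_of_mul_le_mul_left (by omega) (by positivity)
    have hmepos : 1 ≤ m - e := by omega
    obtain ⟨k', m', hm', he'⟩ := pvV2n_decomp (m - e) hmepos
    have hk' : 1 ≤ k' := by
      by_contra h
      have : k' = 0 := by omega
      subst this
      simp at he'
      omega
    have hnd : n - d = 2 ^ (j + k') * m' := by
      rw [he, hed, pv_mul_sub _ _ _ hme, he', pow_add]
      ring
    rw [hnd, pvV2n_pow_mul _ _ hm']
    omega

-- the while loop of A computes the mex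
theorem pvMexLoop_eq (s : List Int) (fuel : Nat) (m t : Int) (hmt : m ≤ t)
    (hall : ∀ j : Int, m ≤ j → j < t → j ∈ s) (ht : t ∉ s)
    (hfuel : (t - m).toNat < fuel) : pvMexLoop s fuel m = t := by
  induction fuel generalizing m with
  | zero => omega
  | succ fuel ih =>
    rw [pvMexLoop]
    by_cases hmem : m ∈ s
    · have hne : m ≠ t := fun h => ht (h ▸ hmem)
      rw [if_pos hmem]
      exact ih (m + 1) (by omega) (fun j h1 h2 => hall j (by omega) h2) (by omega)
    · rw [if_neg hmem]
      by_contra hne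
      exact hmem (hall m le_rfl (by omega))

-- the mex of a duplicate-free list is at most its length (fuel sufficiency)
theorem pv_mex_card (s : List Int) (t : Nat)
    (hall : ∀ j : Int, 0 ≤ j → j < (t : Int) → j ∈ s) : t ≤ s.length := by
  have hsub : ((List.range t).map (Nat.cast : Nat → Int)) ⊆ s := by
    intro x hx
    simp only [List.mem_map, List.mem_range] at hx
    obtain ⟨i, hi, rfl⟩ := hx
    exact hall i (by omega) (by exact_mod_cast hi)
  have hnd' : ((List.range t).map (Nat.cast : Nat → Int)).Nodup :=
    (List.nodup_range).map (fun a b h => by exact_mod_cast h)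
  have := (hnd'.subperm hsub).length_le
  simpa using this

theorem pv_mem_foldl_add (f : Int → Int) (l : List Int) (s : PySem.Set Int) (y : Int) :
    y ∈ l.foldl (fun s d => PySem.Set.add s (f d)) s ↔ y ∈ s ∨ ∃ d ∈ l, y = f d := by
  induction l generalizing s with
  | nil => simp
  | cons a l ih =>
    rw [List.foldl_cons, ih]
    rw [PySem.Set.mem_add]
    simp only [List.mem_cons]
    constructor
    · rintro (⟨h | h⟩ | ⟨d, hd, rfl⟩)
      · exact Or.inl h
      · exact Or.inr ⟨a, Or.inl rfl, h⟩
      · exact Or.inr ⟨d, Or.inr hd, rfl⟩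
    · rintro (h | ⟨d, (rfl | hd), rfl⟩)
      · exact Or.inl (Or.inl h)
      · exact Or.inl (Or.inr rfl)
      · exact Or.inr ⟨d, hd, rfl⟩

-- ===== the sieve builds exactly the proper-divisor lists =====

theorem pv_sieve_inner_len (d : Int) (M : List Int) (pd : List (List Int)) :
    (M.foldl (fun pd m => PySem.List.pySetD pd m (PySem.List.pyGetD pd m [] ++ [d])) pd).length
      = pd.length := by
  induction M generalizing pd with
  | nil => rfl
  | cons a M ih => rw [List.foldl_cons, ih, PySem.List.length_pySetD]

theorem pv_sieve_inner_mem (d : Int) (M : List Int) (pd : List (List Int))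
    (hM : ∀ m ∈ M, 0 ≤ m ∧ m < (pd.length : Int)) (n x : Int) (hn : 0 ≤ n)
    (hnl : n < (pd.length : Int)) :
    (x ∈ PySem.List.pyGetD
        (M.foldl (fun pd m => PySem.List.pySetD pd m (PySem.List.pyGetD pd m [] ++ [d])) pd) n [])
      ↔ (x ∈ PySem.List.pyGetD pd n [] ∨ (x = d ∧ n ∈ M)) := by
  induction M generalizing pd with
  | nil => simp
  | cons a M ih =>
    obtain ⟨ha0, hal⟩ := hM a (List.mem_cons_self)
    have hcast_a : ((a.toNat : Nat) : Int) = a := Int.toNat_of_nonneg ha0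
    have hcast_n : ((n.toNat : Nat) : Int) = n := Int.toNat_of_nonneg hn
    have halt : a.toNat < pd.length := by omega
    have hget : ∀ v, PySem.List.pyGetD (PySem.List.pySetD pd a v) n []
        = if n.toNat = a.toNat then v else PySem.List.pyGetD pd n [] := by
      intro v
      rw [← hcast_a, ← hcast_n, PySem.List.pyGetD_pySetD_natCast pd a.toNat n.toNat v [] halt,
        hcast_n, Int.toNat_natCast]
    rw [List.foldl_cons]
    rw [ih _ (fun m hm => by
      have := hM m (List.mem_cons_of_mem a hm)
      rwa [PySem.List.length_pySetD] ) (by rwa [PySem.List.length_pySetD])]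
    rw [hget]
    by_cases hna : n.toNat = a.toNat
    · have hna' : n = a := by omega
      subst hna'
      rw [if_pos hna]
      simp only [List.mem_append, List.mem_cons, List.not_mem_nil, or_false]
      tauto
    · have hna' : n ≠ a := by omega
      rw [if_neg hna]
      simp only [List.mem_cons]
      constructor
      · rintro (h | ⟨rfl, hM'⟩)
        · exact Or.inl h
        · exact Or.inr ⟨rfl, Or.inr hM'⟩
      · rintro (h | ⟨rfl, (rfl | h)⟩)
        · exact Or.inl h
        · exact absurd rfl hna'
        · exact Or.inr ⟨rfl, h⟩

theorem pv_sieve_mem (N : Int) (ds : List Int) (pd : List (List Int))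
    (hds : ∀ d ∈ ds, 1 ≤ d) (hlen : (pd.length : Int) = N + 1)
    (n x : Int) (hn : 0 ≤ n) (hnl : n ≤ N) :
    (x ∈ PySem.List.pyGetD
        (ds.foldl (fun pd d =>
          (PySem.List.pyRange (2 * d) (N + 1) d).foldl (fun pd m =>
            PySem.List.pySetD pd m (PySem.List.pyGetD pd m [] ++ [d])) pd) pd) n [])
      ↔ (x ∈ PySem.List.pyGetD pd n [] ∨ (x ∈ ds ∧ x ∣ n ∧ 2 * x ≤ n)) := by
  induction ds generalizing pd with
  | nil => simp
  | cons a ds ih =>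
    have ha1 : 1 ≤ a := hds a List.mem_cons_self
    rw [List.foldl_cons]
    rw [ih _ (fun d hd => hds d (List.mem_cons_of_mem a hd))
      (by rw [pv_sieve_inner_len]; exact hlen)]
    rw [pv_sieve_inner_mem a (PySem.List.pyRange (2 * a) (N + 1) a) pd (fun m hm => by
        rw [PySem.List.mem_pyRange_iff_of_pos (by omega)] at hm
        constructor <;> omega) n x hn (by omega)]
    have hmemr : (n ∈ PySem.List.pyRange (2 * a) (N + 1) a) ↔ (a ∣ n ∧ 2 * a ≤ n) := by
      rw [PySem.List.mem_pyRange_iff_of_pos (by omega)]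
      constructor
      · rintro ⟨h1, h2, h3⟩
        refine ⟨?_, h1⟩
        have h4 := dvd_add h3 (Dvd.intro 2 (mul_comm a 2))
        simpa using h4
      · rintro ⟨h1, h2⟩
        refine ⟨h2, by omega, ?_⟩
        have : a ∣ 2 * a := Dvd.intro 2 (mul_comm a 2)
        exact dvd_sub h1 this
    rw [hmemr]
    simp only [List.mem_cons]
    constructor
    · rintro ((h | ⟨rfl, h1, h2⟩) | ⟨hx, h1, h2⟩)
      · exact Or.inl h
      · exact Or.inr ⟨Or.inl rfl, h1, h2⟩
      · exact Or.inr ⟨Or.inr hx, h1, h2⟩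
    · rintro (h | ⟨(rfl | hx), h1, h2⟩)
      · exact Or.inl (Or.inl h)
      · exact Or.inl (Or.inr ⟨rfl, h1, h2⟩)
      · exact Or.inr ⟨hx, h1, h2⟩

-- ===== the Grundy loop maintains g[i] = v2(i) =====

theorem pv_gloop_len (pd : List (List Int)) (ns : List Int) (g : List Int) :
    (ns.foldl (fun g n =>
      PySem.List.pySetD g n (pvMexLoop
        ((PySem.List.pyGetD pd n []).foldl
          (fun s d => PySem.Set.add s (PySem.List.pyGetD g (n - d) 0)) PySem.Set.empty)
        (((PySem.List.pyGetD pd n []).foldl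
          (fun s d => PySem.Set.add s (PySem.List.pyGetD g (n - d) 0)) PySem.Set.empty).length + 1)
        0)) g).length = g.length := by
  induction ns generalizing g with
  | nil => rfl
  | cons a ns ih => rw [List.foldl_cons, ih, PySem.List.length_pySetD]

theorem pv_gloop (N : Int) (pd : List (List Int))
    (hpd : ∀ n x : Int, 0 ≤ n → n ≤ N →
      (x ∈ PySem.List.pyGetD pd n [] ↔ 1 ≤ x ∧ x ∣ n ∧ 2 * x ≤ n)) :
    ∀ (fuel : Nat) (a : Int) (g : List Int), 2 ≤ a → fuel = (N + 1 - a).toNat →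
      (g.length : Int) = N + 1 →
      (∀ i : Nat, (i : Int) < N + 1 →
        PySem.List.pyGetD g (i : Int) 0 = if (i : Int) < a then pvV2 i else 0) →
      ∀ i : Nat, (i : Int) < N + 1 →
        PySem.List.pyGetD ((PySem.List.pyRange a (N + 1) 1).foldl (fun g n =>
          PySem.List.pySetD g n (pvMexLoop
            ((PySem.List.pyGetD pd n []).foldl
              (fun s d => PySem.Set.add s (PySem.List.pyGetD g (n - d) 0)) PySem.Set.empty)
            (((PySem.List.pyGetD pd n []).foldl
              (fun s d => PySem.Set.add s (PySem.List.pyGetD g (n - d) 0)) PySem.Set.empty).length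
              + 1) 0)) g) (i : Int) 0 = pvV2 (i : Int) := by
  intro fuel
  induction fuel with
  | zero =>
    intro a g ha2 haf hlen hinv i hi
    have hna : N + 1 ≤ a := by omega
    rw [PySem.List.pyRange_one_eq_nil hna, List.foldl_nil, hinv i hi, if_pos (by omega)]
  | succ fuel ih =>
    intro a g ha2 haf hlen hinv i hi
    have haN : a < N + 1 := by omega
    have ha0 : 0 ≤ a := by omega
    have haA : ((a.toNat : Nat) : Int) = a := Int.toNat_of_nonneg ha0
    have hA2 : 2 ≤ a.toNat := by omega
    -- value of g at a nonnegative index below a is already v2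
    have hgv : ∀ d : Int, 1 ≤ d → 2 * d ≤ a →
        PySem.List.pyGetD g (a - d) 0 = (pvV2n (a.toNat - d.toNat) : Int) := by
      intro d hd1 hd2
      have hc : ((a.toNat - d.toNat : Nat) : Int) = a - d := by omega
      rw [← hc, hinv (a.toNat - d.toNat) (by omega), if_pos (by omega), pvV2_cast]
    -- membership characterization of the reachable set
    have hSy : ∀ y : Int,
        (y ∈ (PySem.List.pyGetD pd a []).foldl
          (fun s d => PySem.Set.add s (PySem.List.pyGetD g (a - d) 0)) PySem.Set.empty)
        ↔ ∃ dn : Nat, 1 ≤ dn ∧ dn ∣ a.toNat ∧ 2 * dn ≤ a.toNat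
            ∧ y = (pvV2n (a.toNat - dn) : Int) := by
      intro y
      rw [pv_mem_foldl_add]
      constructor
      · rintro (h | ⟨d, hd, rfl⟩)
        · exact absurd h (by simp [PySem.Set.empty])
        · rw [hpd a d ha0 (by omega)] at hd
          obtain ⟨hd1, hdvd, hd2⟩ := hd
          refine ⟨d.toNat, by omega, ?_, by omega, ?_⟩
          · rw [← Int.natCast_dvd_natCast, haA, Int.toNat_of_nonneg (by omega)]
            exact hdvd
          · exact hgv d hd1 hd2
      · rintro ⟨dn, hdn1, hdvd, hdn2, rfl⟩
        refine Or.inr ⟨(dn : Int), ?_, ?_⟩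
        · rw [hpd a (dn : Int) ha0 (by omega)]
          refine ⟨by exact_mod_cast hdn1, ?_, by omega⟩
          rw [← haA]
          exact_mod_cast hdvd
        · rw [hgv (dn : Int) (by exact_mod_cast hdn1) (by omega)]
          simp
    set S := (PySem.List.pyGetD pd a []).foldl
      (fun s d => PySem.Set.add s (PySem.List.pyGetD g (a - d) 0)) PySem.Set.empty with hSdef
    have hall : ∀ j : Int, 0 ≤ j → j < ((pvV2n a.toNat : Nat) : Int) → j ∈ S := by
      intro j hj0 hjlt
      obtain ⟨dn, h1, h2, h3, h4⟩ := pv_reach a.toNat hA2 j.toNat (by omega)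
      rw [hSy]
      exact ⟨dn, h1, h2, h3, by omega⟩
    have ht : ((pvV2n a.toNat : Nat) : Int) ∉ S := by
      rw [hSy]
      rintro ⟨dn, h1, h2, h3, h4⟩
      have : pvV2n (a.toNat - dn) = pvV2n a.toNat := by exact_mod_cast h4.symm
      exact pv_not_reach a.toNat hA2 dn h1 h2 h3 this
    have hcard : pvV2n a.toNat ≤ S.length := pv_mex_card S (pvV2n a.toNat) hall
    have hmex : pvMexLoop S (S.length + 1) 0 = ((pvV2n a.toNat : Nat) : Int) :=
      pvMexLoop_eq S (S.length + 1) 0 _ (by omega)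
        (fun j h1 h2 => hall j h1 h2) ht (by omega)
    have hmex' : pvMexLoop S (S.length + 1) 0 = pvV2 a := by
      rw [hmex, ← pvV2_cast, haA]
    -- one step of the loop, then the induction hypothesis
    rw [PySem.List.pyRange_one_cons haN, List.foldl_cons]
    have hAlen : a.toNat < g.length := by omega
    have hinv' : ∀ i : Nat, (i : Int) < N + 1 →
        PySem.List.pyGetD (PySem.List.pySetD g a (pvMexLoop S (S.length + 1) 0)) (i : Int) 0
          = if (i : Int) < a + 1 then pvV2 i else 0 := by
      intro i hi
      rw [← haA, PySem.List.pyGetD_pySetD_natCast g a.toNat i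
        (pvMexLoop S (S.length + 1) 0) 0 hAlen]
      by_cases hia : i = a.toNat
      · subst hia
        rw [if_pos rfl, if_pos (by omega), hmex', haA]
      · rw [if_neg hia, hinv i hi]
        by_cases hlt : (i : Int) < a
        · rw [if_pos hlt, if_pos (by omega)]
        · rw [if_neg hlt, if_neg (by omega)]
    have := ih (a + 1) (PySem.List.pySetD g a (pvMexLoop S (S.length + 1) 0))
      (by omega) (by omega) (by rw [PySem.List.length_pySetD]; exact hlen) hinv' i hi
    exact this

theorem pvV2_zero : pvV2 0 = 0 := by
  rw [pvV2]
  norm_num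

theorem pvV2_one : pvV2 1 = 0 := by
  rw [pvV2]
  norm_num

-- ===== VERDICT (by name: the statement is the Claim_ definition above) =====
theorem compute_grundy_spec : Claim_equal_compute_grundy := by
  intro N _
  show compute_grundy N = compute_grundy_alt N
  by_cases hN : 0 ≤ N
  case neg =>
    unfold compute_grundy compute_grundy_alt
    rw [PySem.List.pyRange_one_eq_nil (show N + 1 ≤ 2 by omega),
      PySem.List.pyRange_one_eq_nil (show N + 1 ≤ 0 by omega),
      Int.toNat_of_nonpos (show N + 1 ≤ 0 by omega)]
    rfl
  case pos =>
    show (PySem.List.pyRange 2 (N + 1) 1).foldl (fun g n =>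
        PySem.List.pySetD g n (pvMexLoop
          ((PySem.List.pyGetD ((PySem.List.pyRange 1 (N + 1) 1).foldl (fun pd d =>
              (PySem.List.pyRange (2 * d) (N + 1) d).foldl (fun pd m =>
                PySem.List.pySetD pd m (PySem.List.pyGetD pd m [] ++ [d])) pd)
              ((PySem.List.pyRange 0 (N + 1) 1).map (fun _ => ([] : List Int)))) n []).foldl
            (fun s d => PySem.Set.add s (PySem.List.pyGetD g (n - d) 0)) PySem.Set.empty)
          (((PySem.List.pyGetD ((PySem.List.pyRange 1 (N + 1) 1).foldl (fun pd d =>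
              (PySem.List.pyRange (2 * d) (N + 1) d).foldl (fun pd m =>
                PySem.List.pySetD pd m (PySem.List.pyGetD pd m [] ++ [d])) pd)
              ((PySem.List.pyRange 0 (N + 1) 1).map (fun _ => ([] : List Int)))) n []).foldl
            (fun s d => PySem.Set.add s (PySem.List.pyGetD g (n - d) 0)) PySem.Set.empty).length
            + 1) 0)) (List.replicate (N + 1).toNat 0)
      = (PySem.List.pyRange 0 (N + 1) 1).map pvV2
    set pd0 : List (List Int) := (PySem.List.pyRange 0 (N + 1) 1).map (fun _ => ([] : List Int))
      with hpd0
    set pd : List (List Int) := (PySem.List.pyRange 1 (N + 1) 1).foldl (fun pd d =>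
        (PySem.List.pyRange (2 * d) (N + 1) d).foldl (fun pd m =>
          PySem.List.pySetD pd m (PySem.List.pyGetD pd m [] ++ [d])) pd) pd0 with hpddef
    have hlen0 : ((pd0.length : Nat) : Int) = N + 1 := by
      rw [hpd0, List.length_map, PySem.List.length_pyRange_one]
      omega
    have hpd : ∀ n x : Int, 0 ≤ n → n ≤ N →
        (x ∈ PySem.List.pyGetD pd n [] ↔ 1 ≤ x ∧ x ∣ n ∧ 2 * x ≤ n) := by
      intro n x hn hnl
      rw [hpddef, pv_sieve_mem N _ pd0 (fun d hd => by
          rw [PySem.List.mem_pyRange_one] at hd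
          omega) hlen0 n x hn hnl]
      have hbase : PySem.List.pyGetD pd0 n [] = ([] : List Int) := by
        rw [hpd0, PySem.List.pyGetD_map_pyRange_of_nonneg _ (N + 1) n [] hn (by omega)]
      rw [hbase, PySem.List.mem_pyRange_one]
      simp only [List.not_mem_nil, false_or]
      constructor
      · rintro ⟨⟨h1, h2⟩, h3, h4⟩
        exact ⟨h1, h3, h4⟩
      · rintro ⟨h1, h3, h4⟩
        exact ⟨⟨h1, by omega⟩, h3, h4⟩
    have hlg0 : (((List.replicate (N + 1).toNat (0 : Int)).length : Nat) : Int) = N + 1 := by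
      rw [List.length_replicate]
      omega
    have hinv0 : ∀ i : Nat, (i : Int) < N + 1 →
        PySem.List.pyGetD (List.replicate (N + 1).toNat (0 : Int)) (i : Int) 0
          = if (i : Int) < 2 then pvV2 i else 0 := by
      intro i hi
      rw [PySem.List.pyGetD_eq_getElem _ _ (by omega) (by rw [List.length_replicate]; omega)]
      rw [List.getElem_replicate]
      by_cases h2 : (i : Int) < 2
      · rw [if_pos h2]
        have hi2 : i < 2 := by omega
        interval_cases i
        · exact pvV2_zero.symm
        · exact_mod_cast pvV2_one.symm
      · rw [if_neg h2]
    have hg := pv_gloop N pd hpd (N - 1).toNat 2 (List.replicate (N + 1).toNat 0)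
      (le_refl 2) (by omega) hlg0 hinv0
    apply List.ext_getElem
    · rw [pv_gloop_len, List.length_replicate, List.length_map, PySem.List.length_pyRange_one]
      omega
    · intro i h1 h2
      have hiN : (i : Int) < N + 1 := by
        rw [pv_gloop_len, List.length_replicate] at h1
        omega
      have hv := hg i hiN
      rw [PySem.List.pyGetD_eq_getElem _ _ (by omega)
        (by rw [pv_gloop_len, List.length_replicate]; omega)] at hv
      simp only [Int.toNat_natCast] at hv
      rw [hv, List.getElem_map, PySem.List.getElem_pyRange_one]
      norm_num
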